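-- pv_equiv track=rewrite | github.com/hsthe29/Translation | argument.py | count_dashes
-- ===== SOURCE A (Python) =====
-- def count_dashes(string):
--     """
--         Đếm số lượng ký tự '-' liên tiếp từ đầu chuỗi
--
--         Args:
--             string: Chuỗi cần đếm
--
--         Returns:
--             Số lượng ký tự '-' liên tiếp từ đầu chuỗi
--         """
--
--     count = 0
--     for i in string:
--         if i == '-':
--             count += 1
--         else:
--             break
--     return count
-- ===== SOURCE B (Python) =====
-- def count_dashes(string):
--     # Binary search for the largest k such that the first k characters
--     # are all '-'. The predicate string[:k] == '-'*k is monotone in k,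
--     # so binary search finds exactly the length of the leading dash run.
--     lo, hi = 0, len(string)
--     while lo < hi:
--         mid = (lo + hi + 1) // 2
--         if string[:mid] == '-' * mid:
--             lo = mid
--         else:
--             hi = mid - 1
--     return lo
-- ===== Notes on version B (the rewrite author's own statement) =====
-- stated objective: alternative
-- what changed: Replaced the linear count-and-break scan by a binary search over prefix lengths for the largest k whose length-k prefix consists entirely of dashes, exploiting that this predicate is monotone in k.
import Mathlib
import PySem

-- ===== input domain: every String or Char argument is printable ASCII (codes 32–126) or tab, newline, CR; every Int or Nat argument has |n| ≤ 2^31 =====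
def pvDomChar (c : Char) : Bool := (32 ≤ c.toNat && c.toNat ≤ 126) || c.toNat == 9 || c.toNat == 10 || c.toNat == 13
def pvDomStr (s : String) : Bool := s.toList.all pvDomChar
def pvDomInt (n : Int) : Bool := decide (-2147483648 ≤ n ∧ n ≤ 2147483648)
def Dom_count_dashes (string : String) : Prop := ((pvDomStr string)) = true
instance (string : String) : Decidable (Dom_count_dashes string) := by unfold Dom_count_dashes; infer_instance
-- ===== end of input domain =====

-- B replaces A's linear count-and-break scan by a binary search over prefix
-- lengths for the largest k with string[:k] == '-'*k (alternative algorithm).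

-- ===== PORT A =====
-- the 'for i in string: if i == '-': count += 1 else: break' loop, with break
def countDashesLoop : List Char → Int → Int
  | [], count => count
  | i :: rest, count => if i == '-' then countDashesLoop rest (count + 1) else count

def count_dashes (string : String) : Int :=
  countDashesLoop string.toList 0

-- ===== PORT B =====
-- the 'while lo < hi' binary-search loop; string[:mid] with 0 ≤ mid ≤ len is
-- exactly List.take mid, '-' * mid is List.replicate mid '-' (both exact here).
-- The fuel argument only makes the loop total: each iteration shrinks hi - lo
-- by at least 1, so fuel = initial hi - lo (= len) always suffices.
def bsearchDashes (cs : List Char) : Nat → Nat → Nat → Nat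
  | 0, lo, _ => lo
  | fuel + 1, lo, hi =>
    if lo < hi then
      let mid := (lo + hi + 1) / 2
      if cs.take mid == List.replicate mid '-' then
        bsearchDashes cs fuel mid hi
      else
        bsearchDashes cs fuel lo (mid - 1)
    else lo

def count_dashes_alt (string : String) : Int :=
  (bsearchDashes string.toList string.toList.length 0 string.toList.length : Int)

-- ===== PRECONDITION & SPEC =====
def Spec_count_dashes (string : String) (out : Int) : Prop := out = count_dashes_alt string
instance (string : String) (out : Int) : Decidable (Spec_count_dashes string out) := by unfold Spec_count_dashes; infer_instance

-- ===== CLAIM =====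
def Claim_equal_count_dashes : Prop := ∀ (string : String), Dom_count_dashes string → Spec_count_dashes string (count_dashes string)

-- ===== LEMMAS AND PROOFS =====
theorem countDashesLoop_eq (cs : List Char) (c : Int) :
    countDashesLoop cs c = c + (cs.takeWhile (· == '-')).length := by
  induction cs generalizing c with
  | nil => simp [countDashesLoop]
  | cons x xs ih =>
    simp only [countDashesLoop, List.takeWhile]
    by_cases h : x == '-'
    · simp [h, ih]; ring
    · simp [h]

-- the prefix predicate is exactly 'k ≤ length of the leading dash run'
theorem take_eq_replicate_iff (cs : List Char) (k : Nat) :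
    (cs.take k = List.replicate k '-') ↔ k ≤ (cs.takeWhile (· == '-')).length := by
  induction cs generalizing k with
  | nil =>
    cases k with
    | zero => simp
    | succ n => simp [List.replicate]
  | cons x xs ih =>
    cases k with
    | zero => simp
    | succ n =>
      rw [List.take_succ_cons, List.replicate_succ, List.takeWhile_cons]
      by_cases h : x == '-'
      · have hx : x = '-' := by simpa using h
        subst hx
        simp [ih]
      · have hx : ¬ x = '-' := by simpa using h
        simp [h, hx]

theorem bsearchDashes_eq (cs : List Char) (fuel lo hi : Nat)
    (hf : hi - lo ≤ fuel)
    (h1 : lo ≤ (cs.takeWhile (· == '-')).length)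
    (h2 : (cs.takeWhile (· == '-')).length ≤ hi) :
    bsearchDashes cs fuel lo hi = (cs.takeWhile (· == '-')).length := by
  set d := (cs.takeWhile (· == '-')).length with hd
  induction fuel generalizing lo hi with
  | zero =>
    simp only [bsearchDashes]
    omega
  | succ n ih =>
    simp only [bsearchDashes]
    by_cases h : lo < hi
    · simp only [h, if_pos]
      set mid := (lo + hi + 1) / 2 with hmid
      have hlomid : lo < mid := by omega
      have hmidhi : mid ≤ hi := by omega
      by_cases hp : cs.take mid = List.replicate mid '-'
      · have hk : mid ≤ d := (take_eq_replicate_iff cs mid).1 hp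
        have : cs.take mid == List.replicate mid '-' := by simpa using hp
        simp only [this, if_pos]
        exact ih mid hi (by omega) hk h2
      · have hk : ¬ mid ≤ d := fun hle => hp ((take_eq_replicate_iff cs mid).2 hle)
        have : ¬ (cs.take mid == List.replicate mid '-') = true := by simpa using hp
        simp only [this, Bool.false_eq_true, if_false]
        exact ih lo (mid - 1) (by omega) h1 (by omega)
    · simp only [h, if_false]
      omega

-- ===== VERDICT =====
theorem count_dashes_spec : Claim_equal_count_dashes := by
  intro s _
  unfold Spec_count_dashes count_dashes count_dashes_alt
  rw [countDashesLoop_eq, bsearchDashes_eq]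
  · simp
  · omega
  · exact Nat.zero_le _
  · exact (List.takeWhile_prefix _).length_le
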